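-- pv_equiv track=rewrite | github.com/isabellakqq/Alogorithm | list/buidingCastle.py | solution
-- ===== SOURCE A (Python) =====
-- def solution(A):
--     if not A:
--         return 0
--
--     i = 0
--     j = 0
--
--     res = 0
--     while i < len(A):
--         while j < len(A) - 1 and A[j] == A[j + 1]:
--             j += 1
--
--         if i == 0 or j == len(A) - 1 or A[i - 1] > A[j] and A[j] < A[j + 1] or A[i - 1] < A[j] and A[j] > A[j + 1]:
--             res += 1
--
--
--         j += 1
--         i = j
--
--     return res
-- ===== SOURCE B (Python) =====
-- def solution(A):
--     C = []
--     for x in A: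
--         if not C or C[-1] != x:
--             C.append(x)
--     if not C:
--         return 0
--     if len(C) == 1:
--         return 1
--     res = 2
--     for p, c, nx in zip(C, C[1:], C[2:]):
--         if p < c > nx or p > c < nx:
--             res += 1
--     return res
-- ===== Notes on version B (the rewrite author's own statement) =====
-- stated objective: simpler
-- what changed: Replaces A's interleaved two-pointer run-walk over indices (inner while advancing j through equal runs, outer while jumping i) with a build-then-scan decomposition: first run-length-compress the list, then one triple-window pass counting the two endpoints plus strict local extrema of the compressed list.
import Mathlib
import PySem

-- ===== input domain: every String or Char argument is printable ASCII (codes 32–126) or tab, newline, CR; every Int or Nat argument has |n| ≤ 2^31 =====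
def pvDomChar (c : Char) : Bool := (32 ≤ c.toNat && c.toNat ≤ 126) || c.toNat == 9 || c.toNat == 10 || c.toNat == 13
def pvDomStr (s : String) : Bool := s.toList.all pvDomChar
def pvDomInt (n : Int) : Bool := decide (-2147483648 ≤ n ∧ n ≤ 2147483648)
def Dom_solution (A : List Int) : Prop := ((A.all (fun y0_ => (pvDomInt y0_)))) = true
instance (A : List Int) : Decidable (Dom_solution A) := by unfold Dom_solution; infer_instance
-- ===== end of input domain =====

-- B replaces A's interleaved two-pointer run walk by run-length compression followed by
-- one triple-window scan (endpoints + strict local extrema of the compressed list); same O(n) cost.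

-- ===== PORT A =====
-- inner while loop: advance j over equal neighbours (indices stay in range, so List.getD is exact)
def innerA (A : List Int) (j : Nat) : Nat :=
  if h : j < A.length - 1 ∧ A.getD j 0 = A.getD (j+1) 0 then innerA A (j+1) else j
termination_by A.length - j
decreasing_by omega

theorem innerA_ge (A : List Int) (j : Nat) : j ≤ innerA A j := by
  refine innerA.induct A (fun j => j ≤ innerA A j) ?_ ?_ j
  · intro j h ih; rw [innerA, dif_pos h]; omega
  · intro j h; rw [innerA, dif_neg h]

-- outer while loop of A
def outerA (A : List Int) (i : Nat) (res : Int) : Int :=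
  if hi : i < A.length then
    let j := innerA A i
    let res' := if i = 0 ∨ j = A.length - 1 ∨
        (A.getD (i-1) 0 > A.getD j 0 ∧ A.getD j 0 < A.getD (j+1) 0) ∨
        (A.getD (i-1) 0 < A.getD j 0 ∧ A.getD j 0 > A.getD (j+1) 0)
      then res + 1 else res
    outerA A (j+1) res'
  else res
termination_by A.length - i
decreasing_by have := innerA_ge A i; omega

def solution (A : List Int) : Int :=
  if A = [] then 0 else outerA A 0 0

-- ===== PORT B =====
def solution_alt (A : List Int) : Int :=
  let C := A.foldl (fun C x => if C = [] ∨ C.getLast? ≠ some x then C ++ [x] else C) []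
  if C = [] then 0
  else if C.length = 1 then 1
  else ((C.zip (C.drop 1)).zip (C.drop 2)).foldl
      (fun res t => if (t.1.1 < t.1.2 ∧ t.2 < t.1.2) ∨ (t.1.2 < t.1.1 ∧ t.1.2 < t.2) then res + 1 else res) 2

-- ===== PRECONDITION & SPEC =====
def Spec_solution (A : List Int) (out : Int) : Prop := out = solution_alt A
instance (A : List Int) (out : Int) : Decidable (Spec_solution A out) := by unfold Spec_solution; infer_instance

-- ===== CLAIM (what is proved, stated in full; the proofs are below) =====
def Claim_equal_solution : Prop := ∀ (A : List Int), Dom_solution A → Spec_solution A (solution A)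

-- ===== LEMMAS AND PROOFS =====

-- adjacent-duplicate removal, seeded with the previous kept value
def dedupFrom : Int → List Int → List Int
  | _, [] => []
  | v, x :: xs => if x = v then dedupFrom v xs else x :: dedupFrom x xs

-- run-compressed list
def cmpr : List Int → List Int
  | [] => []
  | a :: as => a :: dedupFrom a as

-- count of A's loop from a run that starts after a previous distinct-region value `prev`
def g : Int → List Int → Int
  | _, [] => 0
  | _, [_] => 1
  | prev, c :: nx :: rest => (if (prev > c ∧ c < nx) ∨ (prev < c ∧ c > nx) then 1 else 0) + g c (nx :: rest)

-- count of B's middle-window loop, in recursive form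
def countMid : List Int → Int
  | p :: c :: nx :: rest => (if (p < c ∧ nx < c) ∨ (c < p ∧ c < nx) then 1 else 0) + countMid (c :: nx :: rest)
  | _ => 0

theorem innerA_le (A : List Int) (i : Nat) (h : i ≤ A.length - 1) : innerA A i ≤ A.length - 1 := by
  refine innerA.induct A (fun j => j ≤ A.length - 1 → innerA A j ≤ A.length - 1) ?_ ?_ i h
  · intro j h ih hj; rw [innerA, dif_pos h]; exact ih (by omega)
  · intro j h hj; rw [innerA, dif_neg h]; exact hj

theorem innerA_run (A : List Int) (i : Nat) :
    ∀ k, i ≤ k → k ≤ innerA A i → A.getD k 0 = A.getD i 0 := by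
  refine innerA.induct A (fun j => ∀ k, j ≤ k → k ≤ innerA A j → A.getD k 0 = A.getD j 0) ?_ ?_ i
  · intro j h ih k hk1 hk2
    rcases Nat.eq_or_lt_of_le hk1 with rfl | hlt
    · rfl
    · rw [innerA, dif_pos h] at hk2
      rw [ih k (by omega) hk2, h.2]
  · intro j h k hk1 hk2
    rw [innerA, dif_neg h] at hk2
    rw [le_antisymm hk2 hk1]

theorem innerA_stop (A : List Int) (i : Nat) :
    ¬(innerA A i < A.length - 1 ∧ A.getD (innerA A i) 0 = A.getD (innerA A i + 1) 0) := by
  refine innerA.induct A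
    (fun j => ¬(innerA A j < A.length - 1 ∧ A.getD (innerA A j) 0 = A.getD (innerA A j + 1) 0)) ?_ ?_ i
  · intro j h ih; rw [innerA, dif_pos h]; exact ih
  · intro j h; rw [innerA, dif_neg h]; exact h

theorem drop_cons_getD (A : List Int) (i : Nat) (h : i < A.length) :
    A.drop i = A.getD i 0 :: A.drop (i + 1) := by
  rw [List.getD_eq_getElem A 0 h]
  exact List.drop_eq_getElem_cons h

theorem cmpr_cons (a : Int) (l : List Int) : cmpr (a :: l) = a :: dedupFrom a l := rfl

theorem dedupFrom_cons (v x : Int) (xs : List Int) :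
    dedupFrom v (x :: xs) = if x = v then dedupFrom v xs else x :: dedupFrom x xs := rfl

theorem cmpr_drop (A : List Int) (i j : Nat) (hij : i ≤ j) (hj : j < A.length)
    (hrun : ∀ k, i ≤ k → k ≤ j → A.getD k 0 = A.getD i 0)
    (hstop : j + 1 = A.length ∨ A.getD j 0 ≠ A.getD (j + 1) 0) :
    cmpr (A.drop i) = A.getD i 0 :: cmpr (A.drop (j + 1)) := by
  rcases Nat.eq_or_lt_of_le hij with rfl | hlt
  · rw [drop_cons_getD A i hj]
    show _ :: dedupFrom _ _ = _
    congr 1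
    by_cases hE : i + 1 = A.length
    · rw [hE, List.drop_length]; rfl
    · rw [drop_cons_getD A (i+1) (by omega)]
      have hne : A.getD (i+1) 0 ≠ A.getD i 0 := by
        rcases hstop with h1 | h2
        · omega
        · exact fun h => h2 h.symm
      show dedupFrom _ _ = _
      rw [dedupFrom, if_neg hne]
      rfl
  · have h1 : A.getD (i+1) 0 = A.getD i 0 := hrun (i+1) (by omega) (by omega)
    have ih := cmpr_drop A (i+1) j (by omega) hj
      (fun k hk1 hk2 => by rw [hrun k (by omega) hk2, ← h1]) hstop
    rw [drop_cons_getD A (i+1) (by omega), cmpr_cons] at ih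
    injection ih with _ htl
    rw [drop_cons_getD A i (by omega), cmpr_cons,
      drop_cons_getD A (i+1) (by omega), dedupFrom_cons, if_pos h1]
    congr 1
    rw [← h1, htl]
termination_by j - i

theorem outerA_eq (A : List Int) (i : Nat) (res : Int) (h1 : 1 ≤ i) (h2 : i ≤ A.length) :
    outerA A i res = res + g (A.getD (i - 1) 0) (cmpr (A.drop i)) := by
  by_cases hi : i < A.length
  · rw [outerA, dif_pos hi]
    simp only []
    have hge := innerA_ge A i
    have hle : innerA A i ≤ A.length - 1 := innerA_le A i (by omega)
    have hstop := innerA_stop A i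
    have hrun := innerA_run A i
    set j := innerA A i with hjdef
    by_cases hjl : j = A.length - 1
    · have hcd : cmpr (A.drop i) = A.getD i 0 :: cmpr (A.drop (j+1)) :=
        cmpr_drop A i j hge (by omega) hrun (Or.inl (by omega))
      have hdn : A.drop (j+1) = [] := by
        have : A.length ≤ j + 1 := by omega
        exact List.drop_eq_nil_of_le this
      rw [if_pos (Or.inr (Or.inl hjl))]
      rw [outerA, dif_neg (by omega : ¬ j + 1 < A.length)]
      rw [hcd, hdn]
      show res + 1 = res + g _ [_]
      simp [g]
  -- middle run
    · have hjlt : j < A.length - 1 := by omega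
      have hAne : A.getD j 0 ≠ A.getD (j+1) 0 := fun h => hstop ⟨hjlt, h⟩
      have hcd : cmpr (A.drop i) = A.getD i 0 :: cmpr (A.drop (j+1)) :=
        cmpr_drop A i j hge (by omega) hrun (Or.inr hAne)
      have hT : cmpr (A.drop (j+1)) = A.getD (j+1) 0 :: dedupFrom (A.getD (j+1) 0) (A.drop (j+2)) := by
        rw [drop_cons_getD A (j+1) (by omega)]; rfl
      have ih := outerA_eq A (j+1) (if i = 0 ∨ j = A.length - 1 ∨
          (A.getD (i-1) 0 > A.getD j 0 ∧ A.getD j 0 < A.getD (j+1) 0) ∨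
          (A.getD (i-1) 0 < A.getD j 0 ∧ A.getD j 0 > A.getD (j+1) 0)
        then res + 1 else res) (by omega) (by omega)
      simp only [Nat.add_sub_cancel] at ih
      rw [ih, hcd, hT]
      have hij : A.getD i 0 = A.getD j 0 := (hrun j hge le_rfl).symm
      rw [hij, g]
      have hcond : (i = 0 ∨ j = A.length - 1 ∨
          (A.getD (i-1) 0 > A.getD j 0 ∧ A.getD j 0 < A.getD (j+1) 0) ∨
          (A.getD (i-1) 0 < A.getD j 0 ∧ A.getD j 0 > A.getD (j+1) 0)) ↔
          ((A.getD (i-1) 0 > A.getD j 0 ∧ A.getD j 0 < A.getD (j+1) 0) ∨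
          (A.getD (i-1) 0 < A.getD j 0 ∧ A.getD j 0 > A.getD (j+1) 0)) := by
        constructor
        · rintro (h|h|h)
          · omega
          · exact absurd h hjl
          · exact h
        · exact fun h => Or.inr (Or.inr h)
      rw [if_congr hcond rfl rfl]
      split_ifs <;> ring
  · have hiL : i = A.length := by omega
    rw [outerA, dif_neg hi, hiL, List.drop_length]
    show res = res + g _ []
    rw [g]; ring
termination_by A.length - i
decreasing_by have := innerA_ge A i; omega

theorem buildC_aux (l : List Int) : ∀ (acc : List Int) (v : Int), acc ≠ [] → acc.getLast? = some v →
    l.foldl (fun C x => if C = [] ∨ C.getLast? ≠ some x then C ++ [x] else C) acc = acc ++ dedupFrom v l := by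
  induction l with
  | nil => intro acc v _ _; simp [dedupFrom]
  | cons x xs ih =>
    intro acc v hne hlast
    rw [List.foldl_cons]
    by_cases hxv : x = v
    · subst hxv
      rw [if_neg (by simp [hne, hlast])]
      rw [ih acc x hne hlast, dedupFrom_cons, if_pos rfl]
    · rw [if_pos (Or.inr (by rw [hlast]; simp [Ne.symm hxv]))]
      rw [ih (acc ++ [x]) x (by simp) (by simp), dedupFrom_cons, if_neg hxv]
      simp

theorem buildC_eq (A : List Int) :
    A.foldl (fun C x => if C = [] ∨ C.getLast? ≠ some x then C ++ [x] else C) [] = cmpr A := by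
  cases A with
  | nil => rfl
  | cons a as =>
    rw [List.foldl_cons]
    have h0 : (if ([] : List Int) = [] ∨ ([] : List Int).getLast? ≠ some a
        then ([] : List Int) ++ [a] else []) = [a] := by simp
    rw [h0, buildC_aux as [a] a (by simp) (by simp), cmpr_cons]
    rfl

theorem zfold (C : List Int) (r : Int) :
    ((C.zip (C.drop 1)).zip (C.drop 2)).foldl
      (fun res t => if (t.1.1 < t.1.2 ∧ t.2 < t.1.2) ∨ (t.1.2 < t.1.1 ∧ t.1.2 < t.2)
        then res + 1 else res) r = r + countMid C := by
  match C with
  | [] => simp [countMid]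
  | [a] => simp [countMid]
  | [a, b] => simp [countMid]
  | p :: c :: nx :: rest =>
    have ih := zfold (c :: nx :: rest)
      (if (p < c ∧ nx < c) ∨ (c < p ∧ c < nx) then r + 1 else r)
    simp only [List.drop_succ_cons, List.drop_zero, List.zip_cons_cons, List.foldl_cons] at ih ⊢
    rw [ih, countMid]
    split_ifs <;> ring
termination_by C.length

theorem g_countMid (prev : Int) (l : List Int) (h : l ≠ []) :
    g prev l = 1 + countMid (prev :: l) := by
  match l with
  | [c] => simp [g, countMid]
  | c :: nx :: rest =>
    have ih := g_countMid c (nx :: rest) (by simp)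
    rw [g, ih, countMid]
    have hiff : ((prev > c ∧ c < nx) ∨ (prev < c ∧ c > nx)) ↔
        ((prev < c ∧ nx < c) ∨ (c < prev ∧ c < nx)) := by
      constructor <;> rintro (⟨u, w⟩ | ⟨u, w⟩)
      · exact Or.inr ⟨u, w⟩
      · exact Or.inl ⟨u, w⟩
      · exact Or.inr ⟨u, w⟩
      · exact Or.inl ⟨u, w⟩
    rw [if_congr hiff rfl rfl]
    split_ifs <;> ring
termination_by l.length

theorem solution_spec : Claim_equal_solution := by
  unfold Claim_equal_solution
  intro A _
  unfold Spec_solution solution solution_alt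
  simp only [buildC_eq]
  by_cases hA : A = []
  · subst hA; simp [cmpr]
  · rw [if_neg hA]
    have hlen : 0 < A.length := List.length_pos_iff.mpr hA
    rw [outerA, dif_pos hlen]
    simp only []
    set j := innerA A 0 with hjdef
    have hle : j ≤ A.length - 1 := innerA_le A 0 (by omega)
    have hstop := innerA_stop A 0
    have hrun := innerA_run A 0
    rw [if_pos (Or.inl trivial)]
    have hstop' : j + 1 = A.length ∨ A.getD j 0 ≠ A.getD (j + 1) 0 := by
      by_cases h : j + 1 = A.length
      · exact Or.inl h
      · exact Or.inr (fun he => hstop ⟨by omega, he⟩)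
    have hcd : cmpr A = A.getD 0 0 :: cmpr (A.drop (j + 1)) := by
      have := cmpr_drop A 0 j (Nat.zero_le _) (by omega) hrun hstop'
      rwa [List.drop_zero] at this
    by_cases hj : j + 1 = A.length
    · rw [outerA, dif_neg (by omega)]
      have hdn : A.drop (j + 1) = [] := List.drop_eq_nil_of_le (by omega)
      rw [hcd, hdn]
      simp [cmpr]
    · have hj1 : j + 1 < A.length := by omega
      have heq := outerA_eq A (j + 1) (0 + 1) (by omega) (by omega)
      simp only [Nat.add_sub_cancel] at heq
      rw [heq]
      have hT : cmpr (A.drop (j + 1)) =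
          A.getD (j + 1) 0 :: dedupFrom (A.getD (j + 1) 0) (A.drop (j + 2)) := by
        rw [drop_cons_getD A (j + 1) hj1]; rfl
      have hjp : A.getD j 0 = A.getD 0 0 := hrun j (Nat.zero_le _) le_rfl
      rw [hjp, hT, hcd, hT]
      rw [if_neg (by simp), if_neg (by simp)]
      rw [zfold]
      rw [g_countMid _ _ (by simp)]
      ring
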